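-- pv_equiv track=rewrite | github.com/ViDok-BK/Visualize | MolGraph/fingerprints/ECFP.py | sum_bonds
-- ===== SOURCE A (Python) =====
-- def sum_bonds(connectivity):
--     numbers_bond = 0
--     double_flag = False
--     for bond_order in connectivity.values():
--         if bond_order in range(0,10):
--             numbers_bond += bond_order
--         elif bond_order == 10:
--             if double_flag:
--                 numbers_bond += 2
--                 double_flag = False
--             else:
--                 numbers_bond += 1
--                 double_flag = True
--         else:
--             raise Exception("unknown bond type",bond_order,"in",connectivity)
--     return numbers_bond
-- ===== SOURCE B (Python) =====
-- def sum_bonds(connectivity):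
--     vals = list(connectivity.values())
--     bad = [v for v in vals if v not in range(0, 10) and v != 10]
--     if bad:
--         raise Exception("unknown bond type", bad[0], "in", connectivity)
--     tens = vals.count(10)
--     # k-th order-10 bond contributes 1 if k odd, 2 if k even: total tens + tens//2
--     return sum(v for v in vals if v in range(0, 10)) + tens + tens // 2
-- ===== Notes on version B (the rewrite author's own statement) =====
-- stated objective: simpler
-- what changed: Replaces A's single stateful loop with a double_flag state machine by staged loop-free passes: validate all values, then sum the in-range values, count the order-10 bonds and add their paired contribution once in closed form (tens + tens // 2).
import Mathlib
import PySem

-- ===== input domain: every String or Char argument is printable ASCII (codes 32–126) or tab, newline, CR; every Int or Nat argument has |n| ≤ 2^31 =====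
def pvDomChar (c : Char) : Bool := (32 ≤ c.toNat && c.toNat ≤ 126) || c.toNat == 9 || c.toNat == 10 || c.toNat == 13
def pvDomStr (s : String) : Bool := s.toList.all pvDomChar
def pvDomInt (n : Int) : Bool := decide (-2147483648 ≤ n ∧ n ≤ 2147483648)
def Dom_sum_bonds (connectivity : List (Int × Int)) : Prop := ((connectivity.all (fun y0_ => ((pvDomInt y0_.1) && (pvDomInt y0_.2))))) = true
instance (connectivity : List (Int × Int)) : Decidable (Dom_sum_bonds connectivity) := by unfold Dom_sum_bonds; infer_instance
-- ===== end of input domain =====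

-- B drops A's double_flag state machine for staged loop-free passes: validate, sum the
-- in-range values, count order-10 bonds, add their paired contribution in closed form
-- (objective: simpler).

-- ===== PORT A =====
-- loop over the dict's values with state (numbers_bond, double_flag); none = the raise branch
def sum_bondsLoopA : List Int → Int → Bool → Option Int
  | [], n, _ => some n
  | v :: vs, n, flag =>
    if 0 ≤ v ∧ v < 10 then sum_bondsLoopA vs (n + v) flag
    else if v = 10 then
      if flag then sum_bondsLoopA vs (n + 2) false
      else sum_bondsLoopA vs (n + 1) true
    else none

def sum_bonds (connectivity : List (Int × Int)) : Int :=
  (sum_bondsLoopA (PySem.Dict.ofList connectivity).values 0 false).getD 0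

-- ===== PORT B =====
-- staged passes: bad = invalid values (nonempty = the raise), tens = count of 10s,
-- result = sum of in-range values + tens + tens // 2
def sum_bonds_alt (connectivity : List (Int × Int)) : Int :=
  let vals := (PySem.Dict.ofList connectivity).values
  let bad := vals.filter (fun v => !(decide (0 ≤ v ∧ v < 10)) && !(v == 10))
  if bad ≠ [] then 0   -- raise branch, excluded by Pre_
  else
    let tens : Int := vals.countP (fun v => v == 10)
    (vals.filter (fun v => decide (0 ≤ v ∧ v < 10))).sum + tens + PySem.Int.floordiv tens 2

-- ===== PRECONDITION & SPEC =====
-- Pre_ excludes exactly the inputs where A raises its explicit Exception: some value of the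
-- dict built from the association list lies outside 0..10.
def Pre_sum_bonds (connectivity : List (Int × Int)) : Prop :=
  ∀ v ∈ (PySem.Dict.ofList connectivity).values, 0 ≤ v ∧ v ≤ 10

instance (connectivity : List (Int × Int)) : Decidable (Pre_sum_bonds connectivity) := by
  unfold Pre_sum_bonds; infer_instance

def pvWitness_sum_bonds : (List (Int × Int)) := [(1, 2), (2, 10), (3, 10), (4, 1)]

def Spec_sum_bonds (connectivity : List (Int × Int)) (out : Int) : Prop := out = sum_bonds_alt connectivity
instance (connectivity : List (Int × Int)) (out : Int) : Decidable (Spec_sum_bonds connectivity out) := by unfold Spec_sum_bonds; infer_instance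

-- ===== CLAIM (what is proved, stated in full; the proofs are below) =====
def Claim_equal_sum_bonds : Prop := ∀ (connectivity : List (Int × Int)), Dom_sum_bonds connectivity → Pre_sum_bonds connectivity → Spec_sum_bonds connectivity (sum_bonds connectivity)

-- ===== LEMMAS AND PROOFS =====

lemma countP_ten_nonneg (vs : List Int) : (0 : Int) ≤ (vs.countP (fun v => v == 10) : Int) := by
  positivity

-- A's loop computes B's staged quantities in closed form
lemma loopA_eq (vs : List Int) : ∀ n (flag : Bool), (∀ v ∈ vs, 0 ≤ v ∧ v ≤ 10) →
    sum_bondsLoopA vs n flag =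
      some (n + (vs.filter (fun v => decide (0 ≤ v ∧ v < 10))).sum
              + (vs.countP (fun v => v == 10) : Int)
              + ((vs.countP (fun v => v == 10) : Int) + (if flag then 1 else 0)) / 2) := by
  induction vs with
  | nil => intro n flag _; simp [sum_bondsLoopA]; cases flag <;> simp
  | cons v vs ih =>
    intro n flag h
    have hv := h v (by simp)
    have hrest : ∀ x ∈ vs, 0 ≤ x ∧ x ≤ 10 := fun x hx => h x (by simp [hx])
    by_cases hlt : v < 10
    · have hc : 0 ≤ v ∧ v < 10 := ⟨hv.1, hlt⟩
      simp only [sum_bondsLoopA, if_pos hc, ih _ _ hrest, List.filter_cons, List.countP_cons]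
      simp [hc, show ¬ v = 10 by omega]
      ring
    · have h10 : v = 10 := by omega
      have hC := countP_ten_nonneg vs
      cases flag with
      | false =>
        simp only [sum_bondsLoopA, if_neg (by omega : ¬ (0 ≤ v ∧ v < 10)), if_pos h10,
          ih _ _ hrest, List.filter_cons, List.countP_cons]
        simp [h10]
        ring
      | true =>
        simp only [sum_bondsLoopA, if_neg (by omega : ¬ (0 ≤ v ∧ v < 10)), if_pos h10,
          ih _ _ hrest, List.filter_cons, List.countP_cons]
        simp [h10]
        omega

lemma bad_nil (vs : List Int) (h : ∀ v ∈ vs, 0 ≤ v ∧ v ≤ 10) :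
    vs.filter (fun v => !(decide (0 ≤ v ∧ v < 10)) && !(v == 10)) = [] := by
  rw [List.filter_eq_nil_iff]
  intro v hv
  have := h v hv
  simp only [Bool.and_eq_true, Bool.not_eq_true', beq_eq_false_iff_ne, decide_eq_false_iff_not]
  omega

-- ===== VERDICT (by name: the statement is the Claim_ definition above) =====
theorem sum_bonds_spec : Claim_equal_sum_bonds := by
  intro c _ hpre
  unfold Spec_sum_bonds sum_bonds sum_bonds_alt
  rw [loopA_eq _ _ _ hpre]
  simp only [bad_nil _ hpre, ne_eq, not_true_eq_false, ite_false, PySem.Int.floordiv]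
  rw [Int.fdiv_eq_ediv_of_nonneg _ (by norm_num : (0:Int) ≤ 2)]
  simp
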